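-- pv_equiv track=rewrite | github.com/Boerseth/aoc | python/2015/5.py | is_nice_1
-- ===== SOURCE A (Python) =====
-- def is_nice_1(s):
--     if not 3 <= sum(1 for c in s if c in "aeiou"):
--         return False
--     if not any(a == b for a, b in zip(s, s[1:])):
--         return False
--     if any(banned in s for banned in ["ab", "cd", "pq", "xy"]):
--         return False
--     return True
-- ===== SOURCE B (Python) =====
-- BANNED_PAIRS = (('a', 'b'), ('c', 'd'), ('p', 'q'), ('x', 'y'))
--
-- def is_nice_1(s):
--     vowels = 0
--     has_double = False
--     has_banned = False
--     prev = None
--     for c in s: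
--         if c in "aeiou":
--             vowels += 1
--         if prev is not None:
--             if prev == c:
--                 has_double = True
--             if (prev, c) in BANNED_PAIRS:
--                 has_banned = True
--         prev = c
--     return vowels >= 3 and has_double and not has_banned
-- ===== Notes on version B (the rewrite author's own statement) =====
-- stated objective: alternative
-- what changed: Replaces A's three separate scans (a vowel-count pass, a zip pass over adjacent pairs, and four substring searches) by one single loop over the characters tracking the previous character, accumulating the vowel count and the double/banned flags; same linear cost.
import Mathlib
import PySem

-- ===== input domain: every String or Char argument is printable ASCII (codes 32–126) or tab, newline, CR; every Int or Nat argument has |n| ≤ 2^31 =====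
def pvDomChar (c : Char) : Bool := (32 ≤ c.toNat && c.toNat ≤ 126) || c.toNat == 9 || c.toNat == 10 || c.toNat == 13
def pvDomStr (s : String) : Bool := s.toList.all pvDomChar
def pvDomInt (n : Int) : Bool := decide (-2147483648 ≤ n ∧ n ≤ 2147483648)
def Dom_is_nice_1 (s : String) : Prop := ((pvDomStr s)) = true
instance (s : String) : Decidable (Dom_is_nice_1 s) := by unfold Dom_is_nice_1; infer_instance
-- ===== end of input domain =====

-- B fuses A's three separate scans into one loop over the characters tracking the previous one (alternative decomposition, same linear cost).

-- ===== PORT A =====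
def is_nice_1 (s : String) : Bool :=
  if !(decide (3 ≤ s.toList.foldl
      (fun acc c => if "aeiou".toList.contains c then acc + 1 else acc) (0 : Int))) then
    false
  else if !((s.toList.zip (s.toList.drop 1)).any (fun p => p.1 == p.2)) then
    false
  else if (["ab", "cd", "pq", "xy"] : List String).any (fun b => PySem.Str.isIn b s) then
    false
  else
    true

-- ===== PORT B =====
def nice1Step (st : Int × Bool × Bool × Option Char) (c : Char) : Int × Bool × Bool × Option Char :=
  let v := if "aeiou".toList.contains c then st.1 + 1 else st.1
  match st.2.2.2 with
  | some p =>
      (v, st.2.1 || (p == c),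
          st.2.2.1 || [('a','b'),('c','d'),('p','q'),('x','y')].contains (p, c), some c)
  | none => (v, st.2.1, st.2.2.1, some c)

def is_nice_1_alt (s : String) : Bool :=
  let st := s.toList.foldl nice1Step (0, false, false, none)
  decide (3 ≤ st.1) && st.2.1 && !st.2.2.1

-- ===== PRECONDITION & SPEC =====
def Spec_is_nice_1 (s : String) (out : Bool) : Prop := out = is_nice_1_alt s
instance (s : String) (out : Bool) : Decidable (Spec_is_nice_1 s out) := by unfold Spec_is_nice_1; infer_instance

-- ===== CLAIM (what is proved, stated in full; the proofs are below) =====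
def Claim_equal_is_nice_1 : Prop := ∀ (s : String), Dom_is_nice_1 s → Spec_is_nice_1 s (is_nice_1 s)

-- ===== LEMMAS AND PROOFS =====

def nice1Adj (f : Char → Char → Bool) : Char → List Char → Bool
  | _, [] => false
  | p, c :: l => f p c || nice1Adj f c l

def nice1Last : Char → List Char → Char
  | p, [] => p
  | _, c :: l => nice1Last c l

theorem nice1_adj_eq_zip_any (f : Char → Char → Bool) (p : Char) (l : List Char) :
    nice1Adj f p l = ((p :: l).zip l).any (fun q => f q.1 q.2) := by
  induction l generalizing p with
  | nil => rfl
  | cons c t ih => simp [nice1Adj, ih c]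

theorem nice1_any_or {α : Type} (l : List α) (f g : α → Bool) :
    l.any (fun x => f x || g x) = (l.any f || l.any g) := by
  induction l with
  | nil => rfl
  | cons a t ih => simp [ih, Bool.or_assoc, Bool.or_left_comm]

theorem nice1_infix_pair (a b : Char) (l : List Char) :
    PySem.Chars.isIn [a, b] l =
      ((l.zip (l.drop 1)).any (fun q => q.1 == a && q.2 == b)) := by
  rw [Bool.eq_iff_iff, PySem.Chars.isIn_iff_infix]
  induction l with
  | nil => simp
  | cons c t ih =>
    rw [List.infix_cons_iff]
    cases t with
    | nil => simp
    | cons d t2 =>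
      simp only [List.cons_prefix_cons, List.drop_one, List.zip_cons_cons, List.any_cons,
        List.tail_cons] at *
      constructor
      · rintro (⟨rfl, rfl, -⟩ | h)
        · simp
        · simp [ih.mp h]
      · intro h
        rcases Bool.or_eq_true _ _ |>.mp h with h | h
        · simp only [Bool.and_eq_true, beq_iff_eq] at h
          exact Or.inl ⟨h.1.symm, by simp [h.2.symm]⟩
        · exact Or.inr (ih.mpr h)

theorem nice1_loop_some (l : List Char) (v : Int) (d bn : Bool) (p : Char) :
    l.foldl nice1Step (v, d, bn, some p) =
      (v + (l.countP (fun c => "aeiou".toList.contains c) : Int),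
       d || nice1Adj (fun x y => x == y) p l,
       bn || nice1Adj (fun x y => [('a','b'),('c','d'),('p','q'),('x','y')].contains (x, y)) p l,
       some (nice1Last p l)) := by
  induction l generalizing v d bn p with
  | nil => simp [nice1Adj, nice1Last]
  | cons c t ih =>
    simp only [List.foldl_cons, nice1Step, nice1Adj, nice1Last, List.countP_cons, ih,
      Bool.or_assoc]
    split_ifs with h <;> simp [Bool.or_assoc] <;> push_cast <;> ring_nf

theorem is_nice_1_spec : Claim_equal_is_nice_1 := by
  intro s _
  unfold Spec_is_nice_1 is_nice_1 is_nice_1_alt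
  cases hl : s.toList with
  | nil => simp
  | cons c t =>
    have hfoldA : ∀ (v : Int), (c :: t).foldl
        (fun acc c => if "aeiou".toList.contains c then acc + 1 else acc) v =
        v + ((c :: t).countP (fun c => "aeiou".toList.contains c) : Int) := by
      intro v
      exact PySem.List.foldl_if_add_one _ _ _
    have hB : (c :: t).foldl nice1Step ((0 : Int), false, false, none) =
        ((if "aeiou".toList.contains c then (1:Int) else 0) +
           (t.countP (fun c => "aeiou".toList.contains c) : Int),
         nice1Adj (fun x y => x == y) c t,
         nice1Adj (fun x y => [('a','b'),('c','d'),('p','q'),('x','y')].contains (x, y)) c t,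
         some (nice1Last c t)) := by
      rw [List.foldl_cons]
      show t.foldl nice1Step (_, false, false, some c) = _
      rw [nice1_loop_some]
      split_ifs <;> simp
    -- banned substrings → adjacent-pair scan
    have hban : (["ab", "cd", "pq", "xy"] : List String).any (fun b => PySem.Str.isIn b s) =
        nice1Adj (fun x y => [('a','b'),('c','d'),('p','q'),('x','y')].contains (x, y)) c t := by
      have h1 : ∀ a b : Char, PySem.Chars.isIn [a, b] (c :: t) =
          (((c :: t).zip t).any (fun q => q.1 == a && q.2 == b)) := by
        intro a b
        simpa using nice1_infix_pair a b (c :: t)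
      simp only [List.any_cons, List.any_nil, PySem.Str.isIn_eq, hl]
      have hs : ("ab".toList = ['a','b']) ∧ ("cd".toList = ['c','d']) ∧
             ("pq".toList = ['p','q']) ∧ ("xy".toList = ['x','y']) := by decide
      rw [hs.1, hs.2.1, hs.2.2.1, hs.2.2.2, h1, h1, h1, h1,
        nice1_adj_eq_zip_any]
      simp only [Bool.or_false]
      rw [← nice1_any_or, ← nice1_any_or, ← nice1_any_or]
      congr 1
      funext q
      obtain ⟨x, y⟩ := q
      rw [Bool.eq_iff_iff]
      simp only [List.contains_cons, List.contains_nil, Bool.or_eq_true, Bool.and_eq_true,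
        beq_iff_eq, Prod.mk.injEq, Bool.or_false, or_false]
    have hdub : ((c :: t).zip ((c :: t).drop 1)).any (fun p => p.1 == p.2) =
        nice1Adj (fun x y => x == y) c t := by
      rw [nice1_adj_eq_zip_any]; rfl
    have hcnt : ((0:Int) + (((c :: t).countP (fun c => "aeiou".toList.contains c) : Nat) : Int)) =
        (if "aeiou".toList.contains c then (1:Int) else 0) +
          ((t.countP (fun c => "aeiou".toList.contains c) : Nat) : Int) := by
      simp only [List.countP_cons]
      split_ifs <;> push_cast <;> ring
    simp only [hfoldA, hB, hban, hdub, hcnt]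
    cases hd : decide (3 ≤ (if "aeiou".toList.contains c then (1:Int) else 0) +
        ((t.countP (fun c => "aeiou".toList.contains c) : Nat) : Int)) <;>
      cases h2 : nice1Adj (fun x y => x == y) c t <;>
      cases h3 : nice1Adj (fun x y => [('a','b'),('c','d'),('p','q'),('x','y')].contains (x, y)) c t <;>
      simp [hd, h2, h3]
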